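-- pv_equiv track=rewrite | github.com/lacoco-lab/decompiling_transformers | crasp/scripts/patching/patching_data.py | get_next_tokens
-- ===== SOURCE A (Python) =====
-- def get_next_tokens(pos_sample):
--     num_blocks = 1
--     last_bit = "0"
--     output_tokens = []
--     for letter in pos_sample:
--         if letter != last_bit:
--             num_blocks += 1
--
--         if num_blocks == 4:
--             output_tokens.append(set(["1", "<eos>"]))
--         elif num_blocks > 4:
--             raise RuntimeError
--         else:
--             output_tokens.append(set(["0", "1", "<eos>"]))
--
--         last_bit = letter
--
--     return output_tokens
-- ===== SOURCE B (Python) =====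
-- def get_next_tokens(pos_sample):
--     # Stage 1: indices where a new block starts (each char compared with its
--     # predecessor, the string being seeded with "0").
--     changes = [i for i, (cur, prev) in enumerate(zip(pos_sample, "0" + pos_sample)) if cur != prev]
--     if len(changes) > 3:
--         raise RuntimeError
--     # Stage 2: block 4 starts at the 3rd change (if any); closed-form construction.
--     k = changes[2] if len(changes) >= 3 else len(pos_sample)
--     return [{"0", "1", "<eos>"} for _ in range(k)] + [{"1", "<eos>"} for _ in range(len(pos_sample) - k)]
-- ===== Notes on version B (the rewrite author's own statement) =====
-- stated objective: alternative
-- what changed: B replaces A's stateful per-character emission loop by two stages: it first builds the list of change indices (each char compared with its predecessor, seeded with '0'), then constructs the whole output in closed form as k copies of {'0','1','<eos>'} followed by n-k copies of {'1','<eos>'}, where k is the third change index (or n).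
import Mathlib
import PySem

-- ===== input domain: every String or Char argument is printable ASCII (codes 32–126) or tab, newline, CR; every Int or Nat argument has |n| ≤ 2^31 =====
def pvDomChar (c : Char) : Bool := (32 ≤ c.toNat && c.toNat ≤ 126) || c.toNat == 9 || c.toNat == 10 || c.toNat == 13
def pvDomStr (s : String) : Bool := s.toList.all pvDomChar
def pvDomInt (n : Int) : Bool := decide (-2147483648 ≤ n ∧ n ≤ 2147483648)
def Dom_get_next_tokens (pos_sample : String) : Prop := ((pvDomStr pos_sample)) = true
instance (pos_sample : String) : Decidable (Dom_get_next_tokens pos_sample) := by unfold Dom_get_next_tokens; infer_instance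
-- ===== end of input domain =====

-- B replaces A's stateful per-character loop by two stages: a change-index list, then a
-- closed-form split — k copies of {"0","1","<eos>"} then n-k copies of {"1","<eos>"}
-- (objective: alternative, same cost).
-- Pre_ excludes exactly the inputs on which both Pythons raise RuntimeError (block count > 4).


-- ===== PORT A =====
-- per-character loop of A; on the 'raise RuntimeError' branch (excluded by Pre_) it stops, returning the list so far
def goA : List Char → Int → Char → List (List String)
  | [], _, _ => []
  | letter :: rest, num_blocks, last_bit =>
    let nb := if letter ≠ last_bit then num_blocks + 1 else num_blocks
    if nb = 4 then PySem.Set.ofList ["1", "<eos>"] :: goA rest nb letter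
    else if nb > 4 then []  -- raise RuntimeError (outside Pre_)
    else PySem.Set.ofList ["0", "1", "<eos>"] :: goA rest nb letter

def get_next_tokens (pos_sample : String) : List (List String) :=
  goA pos_sample.toList 1 '0'

-- ===== PORT B =====
-- Source B: changes = [i for i, (cur, prev) in enumerate(zip(pos_sample, "0" + pos_sample)) if cur != prev]
-- then k = changes[2] if len(changes) >= 3 else len(pos_sample), and the result is
-- k copies of {"0","1","<eos>"} followed by n-k copies of {"1","<eos>"}
-- ([x for _ in range(m)] is ported as List.replicate m x).
def get_next_tokens_alt (pos_sample : String) : List (List String) :=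
  let t := pos_sample.toList
  let changes : List Int :=
    (PySem.List.enumerate (t.zip ('0' :: t)) 0).filterMap
      (fun p => if p.2.1 ≠ p.2.2 then some p.1 else none)
  if changes.length > 3 then []  -- raise RuntimeError (outside Pre_)
  else
    let k : Int := if changes.length ≥ 3 then changes.getD 2 0 else (t.length : Int)
    List.replicate k.toNat (PySem.Set.ofList ["0", "1", "<eos>"]) ++
      List.replicate ((t.length : Int) - k).toNat (PySem.Set.ofList ["1", "<eos>"])

-- ===== PRECONDITION & SPEC =====
-- Pre_ excludes exactly the inputs on which Python A raises RuntimeError: the string has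
-- more than 4 blocks (adjacent-change count, seeded with '0'); B raises there too.
def Pre_get_next_tokens (pos_sample : String) : Prop :=
  1 + (('0' :: pos_sample.toList).zip pos_sample.toList).countP (fun p => p.1 ≠ p.2) ≤ 4
instance (pos_sample : String) : Decidable (Pre_get_next_tokens pos_sample) := by
  unfold Pre_get_next_tokens; infer_instance

def pvWitness_get_next_tokens : String := "0011"

def Spec_get_next_tokens (pos_sample : String) (out : List (List String)) : Prop := out = get_next_tokens_alt pos_sample
instance (pos_sample : String) (out : List (List String)) : Decidable (Spec_get_next_tokens pos_sample out) := by unfold Spec_get_next_tokens; infer_instance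

-- ===== CLAIM =====
def Claim_equal_get_next_tokens : Prop := ∀ (pos_sample : String), Dom_get_next_tokens pos_sample → Pre_get_next_tokens pos_sample → Spec_get_next_tokens pos_sample (get_next_tokens pos_sample)

-- ===== LEMMAS AND PROOFS =====

def tok3 : List String := PySem.Set.ofList ["0", "1", "<eos>"]
def tok4 : List String := PySem.Set.ofList ["1", "<eos>"]

-- Nat-valued change-index list, recursive form
def chgN : List Char → Char → List Nat
  | [], _ => []
  | c :: r, prev => (if c ≠ prev then [0] else []) ++ (chgN r c).map (· + 1)

theorem enum_shift (xs : List (Char × Char)) (s : Int) :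
    PySem.List.enumerate xs (s + 1) = (PySem.List.enumerate xs s).map (fun p => (p.1 + 1, p.2)) := by
  induction xs generalizing s with
  | nil => simp [PySem.List.enumerate_nil]
  | cons x xs ih =>
    rw [PySem.List.enumerate_cons, PySem.List.enumerate_cons, List.map_cons]
    have := ih (s + 1)
    rw [show s + 1 + 1 = (s + 1) + 1 by ring] at this
    rw [this]

-- B's changes list equals the Int image of chgN
theorem chg_eq (t : List Char) (prev : Char) :
    (PySem.List.enumerate (t.zip (prev :: t)) 0).filterMap
        (fun p => if p.2.1 ≠ p.2.2 then some p.1 else none)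
      = (chgN t prev).map (fun n : Nat => (n : Int)) := by
  induction t generalizing prev with
  | nil => simp [chgN, PySem.List.enumerate_nil]
  | cons c r ih =>
    rw [show (c :: r).zip (prev :: c :: r) = (c, prev) :: r.zip (c :: r) from rfl,
        PySem.List.enumerate_cons, show (0 : Int) + 1 = 0 + 1 from rfl, enum_shift]
    have hrec : ((PySem.List.enumerate (r.zip (c :: r)) 0).map (fun p => (p.1 + 1, p.2))).filterMap
        (fun p => if p.2.1 ≠ p.2.2 then some p.1 else none)
        = ((chgN r c).map (fun n : Nat => (n : Int))).map (· + 1) := by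
      rw [List.filterMap_map, ← ih c, List.map_filterMap]
      congr 1
      funext p
      by_cases h : p.2.1 ≠ p.2.2 <;> simp [h]
    have hcast : ((chgN r c).map (fun n : Nat => (n : Int))).map (fun z : Int => z + 1)
        = ((chgN r c).map (fun n : Nat => n + 1)).map (fun n : Nat => (n : Int)) := by
      rw [List.map_map, List.map_map]
      congr 1
    by_cases h : c ≠ prev
    · have hhead : ((0, c, prev) :: (PySem.List.enumerate (r.zip (c :: r)) 0).map
            (fun p => (p.1 + 1, p.2))).filterMap
            (fun p => if p.2.1 ≠ p.2.2 then some p.1 else none)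
          = 0 :: ((PySem.List.enumerate (r.zip (c :: r)) 0).map
            (fun p => (p.1 + 1, p.2))).filterMap
            (fun p => if p.2.1 ≠ p.2.2 then some p.1 else none) := by
        simp [List.filterMap_cons, h]
      rw [hhead, hrec, hcast]
      simp [chgN, h]
    · have hhead : ((0, c, prev) :: (PySem.List.enumerate (r.zip (c :: r)) 0).map
            (fun p => (p.1 + 1, p.2))).filterMap
            (fun p => if p.2.1 ≠ p.2.2 then some p.1 else none)
          = ((PySem.List.enumerate (r.zip (c :: r)) 0).map
            (fun p => (p.1 + 1, p.2))).filterMap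
            (fun p => if p.2.1 ≠ p.2.2 then some p.1 else none) := by
        simp only [ne_eq, not_not] at h
        simp [List.filterMap_cons, h]
      rw [hhead, hrec, hcast]
      simp [chgN, h]

-- every change index is a valid position
theorem chgN_lt (t : List Char) (prev : Char) : ∀ x ∈ chgN t prev, x < t.length := by
  induction t generalizing prev with
  | nil => simp [chgN]
  | cons c r ih =>
    intro x hx
    unfold chgN at hx
    rcases List.mem_append.mp hx with h | h
    · have : x = 0 := by by_cases hc : c ≠ prev <;> simp [hc] at h <;> omega
      simp [this]
    · obtain ⟨y, hy, rfl⟩ := List.mem_map.mp h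
      have := ih c y hy
      simp
      omega

-- chgN counts exactly the adjacent changes of Pre_
theorem chgN_length (t : List Char) (prev : Char) :
    (chgN t prev).length = ((prev :: t).zip t).countP (fun p => p.1 ≠ p.2) := by
  induction t generalizing prev with
  | nil => simp [chgN]
  | cons c r ih =>
    rw [show (prev :: c :: r).zip (c :: r) = (prev, c) :: (c :: r).zip r from rfl]
    unfold chgN
    by_cases h : c ≠ prev
    · have h' : prev ≠ c := fun e => h e.symm
      simp [h, h', ih]
    · simp only [ne_eq, not_not] at h
      simp [h, ih]

-- once the block number is 4 and no more changes occur, every token is tok4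
theorem goA_four (t : List Char) (prev : Char) (h : chgN t prev = []) :
    goA t 4 prev = List.replicate t.length tok4 := by
  induction t generalizing prev with
  | nil => simp [goA]
  | cons c r ih =>
    rcases eq_or_ne c prev with hc | hc
    · subst hc
      unfold chgN at h
      simp at h
      simp [goA, List.replicate_succ, tok4, ih c h]
    · unfold chgN at h
      simp [hc] at h

-- getD through (·+1)-map with shifted default
theorem getD_map_succ (l : List Nat) (i d : Nat) :
    (l.map (· + 1)).getD i (d + 1) = l.getD i d + 1 := by
  rcases lt_or_ge i l.length with h | h
  · rw [List.getD_eq_getElem _ _ (by simpa using h), List.getD_eq_getElem _ _ h]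
    simp
  · rw [List.getD_eq_default _ _ (by simpa using h), List.getD_eq_default _ _ h]

-- main invariant: with block number 3 - m (m ≤ 2) and at most m+1 remaining changes,
-- A's loop produces the closed-form split at the (m+1)-st change index
theorem goA_closed (t : List Char) (prev : Char) (m : Nat) (hm : m ≤ 2)
    (hlen : (chgN t prev).length ≤ m + 1) :
    goA t (3 - (m : Int)) prev =
      List.replicate ((chgN t prev).getD m t.length) tok3 ++
        List.replicate (t.length - (chgN t prev).getD m t.length) tok4 := by
  induction t generalizing prev m with
  | nil => simp [goA, chgN]
  | cons c r ih =>
    rcases eq_or_ne c prev with hc | hc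
    · subst hc
      have hch : chgN (c :: r) c = (chgN r c).map (· + 1) := by simp [chgN]
      rw [hch] at hlen ⊢
      simp only [List.length_map] at hlen
      have hb4 : ¬ ((3 : Int) - ((m : Nat) : Int) = 4) := by omega
      have hbg : ¬ ((3 : Int) - ((m : Nat) : Int) > 4) := by omega
      have hif : (if c ≠ c then (3 : Int) - ((m : Nat) : Int) + 1 else 3 - ((m : Nat) : Int))
          = 3 - ((m : Nat) : Int) := by simp
      have hstep : goA (c :: r) (3 - ((m : Nat) : Int)) c =
          tok3 :: goA r (3 - ((m : Nat) : Int)) c := by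
        simp only [goA, hif, if_neg hb4, if_neg hbg, tok3]
      rw [hstep, ih c m hm hlen]
      simp only [List.length_cons]
      rw [getD_map_succ (chgN r c) m r.length]
      have hsub : r.length + 1 - ((chgN r c).getD m r.length + 1)
          = r.length - (chgN r c).getD m r.length := by omega
      rw [hsub, List.replicate_succ, List.cons_append]
    · have hch : chgN (c :: r) prev = 0 :: (chgN r c).map (· + 1) := by simp [chgN, hc]
      rw [hch] at hlen ⊢
      simp only [List.length_cons, List.length_map] at hlen
      match m with
      | 0 =>
        have h0 : chgN r c = [] := by
          have : (chgN r c).length = 0 := by omega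
          exact List.length_eq_zero_iff.mp this
        have hstep : goA (c :: r) (3 - ((0 : Nat) : Int)) prev = tok4 :: goA r 4 c := by
          simp [goA, hc, tok4]
        rw [hstep, goA_four r c h0]
        simp [List.replicate_succ]
      | m' + 1 =>
        have hb4 : ¬ ((3 : Int) - ((m' + 1 : Nat) : Int) + 1 = 4) := by push_cast; omega
        have hbg : ¬ ((3 : Int) - ((m' + 1 : Nat) : Int) + 1 > 4) := by push_cast; omega
        have hstep : goA (c :: r) (3 - ((m' + 1 : Nat) : Int)) prev =
            tok3 :: goA r (3 - ((m' + 1 : Nat) : Int) + 1) c := by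
          simp only [goA, if_pos hc, if_neg hb4, if_neg hbg, tok3]
        have hnb : (3 : Int) - ((m' + 1 : Nat) : Int) + 1 = 3 - ((m' : Nat) : Int) := by
          push_cast; ring
        rw [hstep, hnb, ih c m' (by omega) (by omega)]
        have hk : (0 :: (chgN r c).map (· + 1)).getD (m' + 1) (c :: r).length
            = (chgN r c).getD m' r.length + 1 := by
          show ((chgN r c).map (· + 1)).getD m' (r.length + 1) = _
          exact getD_map_succ _ _ _
        rw [hk]
        simp only [List.length_cons]
        have hsub : r.length + 1 - ((chgN r c).getD m' r.length + 1)
            = r.length - (chgN r c).getD m' r.length := by omega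
        rw [hsub, List.replicate_succ, List.cons_append]

theorem ports_agree (s : String) (hpre : Pre_get_next_tokens s) :
    get_next_tokens s = get_next_tokens_alt s := by
  unfold Pre_get_next_tokens at hpre
  unfold get_next_tokens get_next_tokens_alt
  simp only [chg_eq s.toList '0']
  have hlen3 : (chgN s.toList '0').length ≤ 3 := by
    rw [chgN_length]
    omega
  have hA : goA s.toList 1 '0' = goA s.toList (3 - ((2 : Nat) : Int)) '0' := by norm_num
  rw [hA, goA_closed s.toList '0' 2 (by omega) (by omega)]
  have hnr : ¬ ((chgN s.toList '0').map (fun n : Nat => (n : Int))).length > 3 := by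
    simpa using hlen3
  rw [if_neg hnr]
  simp only [List.length_map]
  by_cases h3 : (chgN s.toList '0').length ≥ 3
  · have h3' : (chgN s.toList '0').length = 3 := by omega
    rw [if_pos h3]
    obtain ⟨a, b, c, habc⟩ : ∃ a b c, chgN s.toList '0' = [a, b, c] := by
      match hl : chgN s.toList '0' with
      | [a, b, c] => exact ⟨a, b, c, rfl⟩
      | [] | [_] | [_, _] | _ :: _ :: _ :: _ :: _ =>
        rw [hl] at h3'
        simp only [List.length_cons, List.length_nil] at h3'
        omega
    have hcn : c < s.toList.length := chgN_lt _ _ c (by rw [habc]; simp)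
    rw [habc]
    simp only [List.map_cons, List.getD, List.getElem?_cons_succ, List.getElem?_cons_zero,
      Option.getD_some]
    have h2 : ((s.toList.length : Int) - (c : Int)).toNat = s.toList.length - c := by omega
    simp [tok3, tok4, h2]
  · rw [if_neg h3]
    rw [List.getD_eq_default _ _ (by omega)]
    simp [tok3]

-- ===== VERDICT =====
theorem get_next_tokens_spec : Claim_equal_get_next_tokens := by
  intro s _ hpre
  exact ports_agree s hpre
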